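-- pv_equiv track=rewrite | github.com/yubinbai/python_practice | partitionPainters.py | partitionPainterHelper
-- ===== SOURCE A (Python) =====
-- def partitionPainterHelper(sumOfData, n, k):
--     if k == 1:
--         return sumOfData[n - 1]
--     minResult = sumOfData[-1]
--     for j in range(k, n):
--         currResult = max(partitionPainterHelper(
--             sumOfData, j, k - 1), sumOfData[n - 1] - sumOfData[j - 1])
--         if currResult < minResult:
--             minResult = currResult
--     return minResult
-- ===== SOURCE B (Python) =====
-- def partitionPainterHelper(sumOfData, n, k):
--     # Bottom-up DP over (segment end, number of parts): the same recurrence as the recursion, each state computed once.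
--     if k == 1:
--         return sumOfData[n - 1]
--     if n <= k:
--         # no split point to try: the recurrence's initial minimum stands
--         return sumOfData[-1]
--     last = sumOfData[-1]
--     prev = [sumOfData[m - 1] for m in range(n + 1)]   # level 1
--     for p in range(2, k + 1):
--         curr = []
--         for m in range(n + 1):
--             best = last
--             for j in range(p, m):
--                 c = max(prev[j], sumOfData[m - 1] - sumOfData[j - 1])
--                 if c < best:
--                     best = c
--             curr.append(best)
--         prev = curr
--     return prev[n]
-- ===== Notes on version B (the rewrite author's own statement) =====
-- stated objective: alternative
-- what changed: Replaced A's top-down recursion over (n,k) by a bottom-up dynamic program that fills one table per painter level, computing each (m,p) state once; degenerate inputs (k=1 or n<=k) are answered directly from the recurrence's base cases.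
import Mathlib
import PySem

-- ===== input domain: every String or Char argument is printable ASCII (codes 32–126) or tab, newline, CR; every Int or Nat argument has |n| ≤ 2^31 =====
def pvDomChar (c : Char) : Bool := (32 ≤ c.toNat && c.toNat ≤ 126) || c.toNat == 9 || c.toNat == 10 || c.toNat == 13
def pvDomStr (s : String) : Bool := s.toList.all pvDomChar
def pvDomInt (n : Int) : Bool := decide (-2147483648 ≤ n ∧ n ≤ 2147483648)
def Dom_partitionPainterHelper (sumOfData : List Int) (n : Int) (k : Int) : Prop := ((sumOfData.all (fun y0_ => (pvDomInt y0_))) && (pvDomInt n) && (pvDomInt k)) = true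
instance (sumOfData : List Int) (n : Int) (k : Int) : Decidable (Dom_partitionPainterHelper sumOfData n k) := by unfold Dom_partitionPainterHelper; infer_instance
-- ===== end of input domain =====

-- B computes the same (m, p) recurrence bottom-up, one DP table per painter level, instead of A's top-down recursion.

-- ===== PORT A =====
-- A's recursion fueled by k.toNat + 1: inside Pre_ every recursive call at level k ≥ 2 passes fuel (k-1).toNat + 1
-- to the (k-1)-level call, and for k ≤ 1 the loop body never recurses, so the fuel never runs out.
def pvAF : Nat → List Int → Int → Int → Int
  | 0, s, n, _ => PySem.List.pyGetD s (n - 1) 0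
  | fuel + 1, s, n, k =>
    if k = 1 then PySem.List.pyGetD s (n - 1) 0
    else
      (PySem.List.pyRange k n 1).foldl
        (fun minResult j =>
          let currResult := max (pvAF fuel s j (k - 1))
            (PySem.List.pyGetD s (n - 1) 0 - PySem.List.pyGetD s (j - 1) 0)
          if currResult < minResult then currResult else minResult)
        (PySem.List.pyGetD s (-1) 0)

def partitionPainterHelper (sumOfData : List Int) (n : Int) (k : Int) : Int :=
  pvAF (k.toNat + 1) sumOfData n k

-- ===== PORT B =====
-- inner 'for j in range(p, m)' loop of Source B
def pvInner (s prev : List Int) (last m p : Int) : Int :=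
  (PySem.List.pyRange p m 1).foldl
    (fun best j =>
      let c := max (PySem.List.pyGetD prev j 0)
        (PySem.List.pyGetD s (m - 1) 0 - PySem.List.pyGetD s (j - 1) 0)
      if c < best then c else best)
    last

-- one DP level: 'curr = []; for m in range(n+1): … curr.append(best)'
def pvLevel (s : List Int) (last n : Int) (prev : List Int) (p : Int) : List Int :=
  (PySem.List.pyRange 0 (n + 1) 1).map (fun m => pvInner s prev last m p)

def partitionPainterHelper_alt (sumOfData : List Int) (n : Int) (k : Int) : Int :=
  if k = 1 then PySem.List.pyGetD sumOfData (n - 1) 0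
  else if n ≤ k then PySem.List.pyGetD sumOfData (-1) 0
  else
    let last := PySem.List.pyGetD sumOfData (-1) 0
    let prev := (PySem.List.pyRange 0 (n + 1) 1).map (fun m => PySem.List.pyGetD sumOfData (m - 1) 0)
    PySem.List.pyGetD ((PySem.List.pyRange 2 (k + 1) 1).foldl (pvLevel sumOfData last n) prev) n 0

-- ===== PRECONDITION & SPEC =====
-- Pre_ is exactly the set of inputs on which Python A returns: a nonempty list and either k = 1 with a valid
-- (possibly negative, Python-wrapping) index n-1, or k ≠ 1 with n ≤ k (the split loop is empty), or the proper
-- DP region 2 ≤ k < n ≤ len.  Outside it A raises IndexError or RecursionError.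
def Pre_partitionPainterHelper (sumOfData : List Int) (n : Int) (k : Int) : Prop :=
  sumOfData ≠ [] ∧
    ((k = 1 ∧ PySem.Raise.InRange sumOfData.length (n - 1)) ∨
     (k ≠ 1 ∧ n ≤ k) ∨
     (2 ≤ k ∧ k < n ∧ n ≤ (sumOfData.length : Int)))
instance (sumOfData : List Int) (n : Int) (k : Int) : Decidable (Pre_partitionPainterHelper sumOfData n k) := by unfold Pre_partitionPainterHelper; infer_instance

def pvWitness_partitionPainterHelper : List Int × Int × Int := ([3, 7, 9], 3, 2)

def Spec_partitionPainterHelper (sumOfData : List Int) (n : Int) (k : Int) (out : Int) : Prop := out = partitionPainterHelper_alt sumOfData n k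
instance (sumOfData : List Int) (n : Int) (k : Int) (out : Int) : Decidable (Spec_partitionPainterHelper sumOfData n k out) := by unfold Spec_partitionPainterHelper; infer_instance

-- ===== CLAIM (what is proved, stated in full; the proofs are below) =====
def Claim_equal_partitionPainterHelper : Prop := ∀ (sumOfData : List Int) (n : Int) (k : Int), Dom_partitionPainterHelper sumOfData n k → Pre_partitionPainterHelper sumOfData n k → Spec_partitionPainterHelper sumOfData n k (partitionPainterHelper sumOfData n k)

-- ===== LEMMAS AND PROOFS =====

-- Invariant: after folding the levels 2..p, entry m of the DP table is A's value for (m, p).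
lemma pv_levels_inv (s : List Int) (n : Int) (p : Int) (hp : 1 ≤ p) :
    ∀ m : Int, 0 ≤ m → m ≤ n →
      PySem.List.pyGetD
        ((PySem.List.pyRange 2 (p + 1) 1).foldl (pvLevel s (PySem.List.pyGetD s (-1) 0) n)
          ((PySem.List.pyRange 0 (n + 1) 1).map (fun m => PySem.List.pyGetD s (m - 1) 0))) m 0
        = pvAF (p.toNat + 1) s m p := by
  induction p, hp using Int.le_induction with
  | base =>
    intro m hm0 hmn
    rw [PySem.List.pyRange_one_eq_nil (by omega : (1:Int) + 1 ≤ 2)]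
    simp only [List.foldl_nil]
    rw [PySem.List.pyGetD_map_pyRange_of_nonneg _ _ _ _ hm0 (by omega)]
    rfl
  | succ p hp ih =>
    intro m hm0 hmn
    rw [show p + 1 + 1 = (p + 1) + 1 from rfl,
        PySem.List.pyRange_one_succ_right (by omega : (2:Int) ≤ p + 1),
        List.foldl_append]
    simp only [List.foldl_cons, List.foldl_nil]
    rw [show pvLevel s (PySem.List.pyGetD s (-1) 0) n
          ((PySem.List.pyRange 2 (p + 1) 1).foldl (pvLevel s (PySem.List.pyGetD s (-1) 0) n)
            ((PySem.List.pyRange 0 (n + 1) 1).map (fun m => PySem.List.pyGetD s (m - 1) 0))) (p + 1)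
        = (PySem.List.pyRange 0 (n + 1) 1).map
            (fun m => pvInner s
              ((PySem.List.pyRange 2 (p + 1) 1).foldl (pvLevel s (PySem.List.pyGetD s (-1) 0) n)
                ((PySem.List.pyRange 0 (n + 1) 1).map (fun m => PySem.List.pyGetD s (m - 1) 0)))
              (PySem.List.pyGetD s (-1) 0) m (p + 1)) from rfl,
        PySem.List.pyGetD_map_pyRange_of_nonneg _ _ _ _ hm0 (by omega)]
    -- unfold A at level p + 1
    have htn : (p + 1).toNat + 1 = (p.toNat + 1) + 1 := by omega
    rw [htn]
    show pvInner s _ (PySem.List.pyGetD s (-1) 0) m (p + 1) = pvAF ((p.toNat + 1) + 1) s m (p + 1)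
    rw [show pvAF ((p.toNat + 1) + 1) s m (p + 1)
        = if p + 1 = 1 then PySem.List.pyGetD s (m - 1) 0
          else
            (PySem.List.pyRange (p + 1) m 1).foldl
              (fun minResult j =>
                let currResult := max (pvAF (p.toNat + 1) s j (p + 1 - 1))
                  (PySem.List.pyGetD s (m - 1) 0 - PySem.List.pyGetD s (j - 1) 0)
                if currResult < minResult then currResult else minResult)
              (PySem.List.pyGetD s (-1) 0) from rfl]
    rw [if_neg (by omega)]
    unfold pvInner
    apply PySem.List.foldl_congr_mem
    intro acc j hj
    rw [PySem.List.mem_pyRange_one] at hj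
    have hjp : pvAF (p.toNat + 1) s j (p + 1 - 1) = pvAF (p.toNat + 1) s j p := by norm_num
    rw [hjp, ← ih j (by omega) (by omega)]

-- ===== VERDICT (by name: the statement is the Claim_ definition above) =====
theorem partitionPainterHelper_spec : Claim_equal_partitionPainterHelper := by
  intro s n k _ hpre
  obtain ⟨hs, hcase⟩ := hpre
  unfold Spec_partitionPainterHelper partitionPainterHelper partitionPainterHelper_alt
  by_cases hk : k = 1
  · subst hk; rfl
  · rw [if_neg hk]
    by_cases hnk : n ≤ k
    · rw [if_pos hnk]
      show pvAF (k.toNat + 1) s n k = PySem.List.pyGetD s (-1) 0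
      rw [show pvAF (k.toNat + 1) s n k
          = if k = 1 then PySem.List.pyGetD s (n - 1) 0
            else
              (PySem.List.pyRange k n 1).foldl
                (fun minResult j =>
                  let currResult := max (pvAF k.toNat s j (k - 1))
                    (PySem.List.pyGetD s (n - 1) 0 - PySem.List.pyGetD s (j - 1) 0)
                  if currResult < minResult then currResult else minResult)
                (PySem.List.pyGetD s (-1) 0) from rfl,
          if_neg hk, PySem.List.pyRange_one_eq_nil hnk]
      rfl
    · rw [if_neg hnk]
      have hk2 : 2 ≤ k := by
        rcases hcase with ⟨h1, _⟩ | ⟨_, h2⟩ | ⟨h3, _, _⟩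
        · exact absurd h1 hk
        · exact absurd h2 hnk
        · exact h3
      rw [← pv_levels_inv s n k (by omega) n (by omega) le_rfl]
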